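-- pv_equiv track=rewrite | github.com/Dechhi/lab | лаба 1 матрица.py | calculate_matrix_F
-- ===== SOURCE A (Python) =====
-- def calculate_matrix_F(A):
--     N = len(A)
--     F = [row[:] for row in A]  # Копируем матрицу A в F
--
--     # Находим минимальный элемент в нечетных столбцах
--     min_odd_columns = float('inf')
--     for i in range(N):
--         if i % 2 == 0:  # нечетные столбцы (0, 2, ...)
--             for j in range(N):
--                 if A[j][i] < min_odd_columns:
--                     min_odd_columns = A[j][i]
--
--     # Считаем сумму чисел в нечетных строках
--     sum_odd_rows = 0
--     for i in range(N):
--         if i % 2 == 0:  # нечетные строки (0, 2, ...)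
--             sum_odd_rows += sum(A[i])
--
--     # Меняем области в F
--     if min_odd_columns < sum_odd_rows:
--         # Поменять симметрично области 3 и 2
--         for i in range(N):
--             if i % 2 == 1:  # четные столбцы
--                 for j in range(N):
--                     if j % 2 == 0:  # нечетные строки
--                         F[j][i], F[i][j] = F[i][j], F[j][i]
--     else:
--         # Поменять несимметрично области 2 и 3
--         for i in range(N):
--             if i % 2 == 0:  # нечетные строки
--                 for j in range(N):
--                     if j % 2 == 1:  # четные столбцы
--                         F[i][j], F[j][i] = F[j][i], F[i][j]
--
--     return F
-- ===== SOURCE B (Python) =====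
-- def calculate_matrix_F(A):
--     # Both of A's branches perform the identical set of swaps, so the result is
--     # simply: transpose each cell (i, j) with i + j odd (within the N x N block).
--     N = len(A)
--     return [[A[j][i] if j < N and (i + j) % 2 == 1 else v
--              for j, v in enumerate(row)]
--             for i, row in enumerate(A)]
-- ===== Notes on version B (the rewrite author's own statement) =====
-- stated objective: simpler
-- what changed: A computes a min/sum only to choose between two branches that perform the identical set of swaps, then mutates a copy in place; B drops the dead min/sum computation entirely and builds the result in one nested comprehension, reading each cell directly from A (F[i][j] = A[j][i] when i+j is odd and both are below N, else the original cell).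
import Mathlib
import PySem

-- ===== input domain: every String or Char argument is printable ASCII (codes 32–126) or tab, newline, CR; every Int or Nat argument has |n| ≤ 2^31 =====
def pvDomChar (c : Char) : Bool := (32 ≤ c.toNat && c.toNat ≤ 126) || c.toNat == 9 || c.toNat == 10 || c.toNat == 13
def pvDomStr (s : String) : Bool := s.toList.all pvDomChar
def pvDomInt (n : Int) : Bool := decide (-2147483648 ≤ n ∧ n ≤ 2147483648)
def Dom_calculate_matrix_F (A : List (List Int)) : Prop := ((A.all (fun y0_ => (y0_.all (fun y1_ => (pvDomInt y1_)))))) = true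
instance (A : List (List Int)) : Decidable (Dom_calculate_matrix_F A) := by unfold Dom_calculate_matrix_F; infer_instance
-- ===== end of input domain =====

-- B drops A's dead min/sum branch selection (both branches perform the identical swaps)
-- and builds the result in one pass: F[i][j] = A[j][i] when i+j is odd (inside the N×N
-- block), else A[i][j].  Objective: simpler.  Equality is about the return value; A
-- mutates only its own fresh copy, so there is no observable side effect either way.

-- ===== PORT A =====
-- cell read F[i][j] (total; inputs admitted by Pre_ never hit the default)
def pvGet (F : List (List Int)) (i j : Nat) : Int := (F.getD i []).getD j 0

-- cell write F[r][c] := v (List.set is a no-op out of range, never reached under Pre_)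
def pvSetCell (F : List (List Int)) (r c : Nat) (v : Int) : List (List Int) :=
  F.set r ((F.getD r []).set c v)

-- Python 'F[r1][c1], F[r2][c2] = F[r2][c2], F[r1][c1]': read both, then assign left to right
def pvSwap (F : List (List Int)) (r1 c1 r2 c2 : Nat) : List (List Int) :=
  let a := pvGet F r1 c1
  let b := pvGet F r2 c2
  pvSetCell (pvSetCell F r1 c1 b) r2 c2 a

-- then-branch loops: for i in range(N): if i%2==1: for j in range(N): if j%2==0: swap F[j][i],F[i][j]
def pvInner1 (N i : Nat) (F : List (List Int)) : List (List Int) :=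
  (List.range N).foldl (fun F j => if j % 2 = 0 then pvSwap F j i i j else F) F
def pvOuter1 (N : Nat) (F : List (List Int)) : List (List Int) :=
  (List.range N).foldl (fun F i => if i % 2 = 1 then pvInner1 N i F else F) F

-- else-branch loops: for i in range(N): if i%2==0: for j in range(N): if j%2==1: swap F[i][j],F[j][i]
def pvInner2 (N i : Nat) (F : List (List Int)) : List (List Int) :=
  (List.range N).foldl (fun F j => if j % 2 = 1 then pvSwap F i j j i else F) F
def pvOuter2 (N : Nat) (F : List (List Int)) : List (List Int) :=
  (List.range N).foldl (fun F i => if i % 2 = 0 then pvInner2 N i F else F) F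

def calculate_matrix_F (A : List (List Int)) : List (List Int) :=
  let N := A.length
  let F := A   -- F = [row[:] for row in A]: a copy; Lean lists are immutable, so F = A
  -- min_odd_columns: starts at float('inf'); 'none' models inf (every int compares below it)
  let minOdd : Option Int := (List.range N).foldl (fun m i =>
      if i % 2 = 0 then
        (List.range N).foldl (fun m j =>
          let v := pvGet A j i
          match m with
          | none => some v
          | some mv => if v < mv then some v else some mv) m
      else m) none
  let sumOdd : Int := (List.range N).foldl (fun s i =>
      if i % 2 = 0 then s + (A.getD i []).foldl (· + ·) 0 else s) 0
  let cond : Bool := match minOdd with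
    | none => false            -- inf < sum_odd_rows is always False
    | some m => decide (m < sumOdd)
  if cond = true then pvOuter1 N F else pvOuter2 N F

-- ===== PORT B =====
def calculate_matrix_F_alt (A : List (List Int)) : List (List Int) :=
  let N := A.length
  A.mapIdx (fun i row => row.mapIdx (fun j v =>
    if j < N ∧ (i + j) % 2 = 1 then pvGet A j i else v))

-- ===== PRECONDITION & SPEC =====
-- columns A's loops actually index in row j: all columns of parity ≠ j%2 below N plus all
-- even columns below N, so even rows need length ≥ N and odd rows length ≥ N (N odd) / N-1 (N even)
def pvRowNeed (N j : Nat) : Nat :=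
  if j % 2 = 0 then N else (if N % 2 = 1 then N else N - 1)

-- exactly the inputs on which the Python A returns (elsewhere it raises IndexError)
def Pre_calculate_matrix_F (A : List (List Int)) : Prop :=
  ∀ j < A.length, pvRowNeed A.length j ≤ (A.getD j []).length
instance (A : List (List Int)) : Decidable (Pre_calculate_matrix_F A) := by
  unfold Pre_calculate_matrix_F; infer_instance

def pvWitness_calculate_matrix_F : List (List Int) := [[1, 2], [3, 4]]

def Spec_calculate_matrix_F (A : List (List Int)) (out : List (List Int)) : Prop := out = calculate_matrix_F_alt A
instance (A : List (List Int)) (out : List (List Int)) : Decidable (Spec_calculate_matrix_F A out) := by unfold Spec_calculate_matrix_F; infer_instance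

-- ===== CLAIM (what is proved, stated in full; the proofs are below) =====
def Claim_equal_calculate_matrix_F : Prop := ∀ (A : List (List Int)), Dom_calculate_matrix_F A → Pre_calculate_matrix_F A → Spec_calculate_matrix_F A (calculate_matrix_F A)

-- ===== LEMMAS AND PROOFS =====

theorem getD_set_outer (l : List (List Int)) (r : Nat) (x : List Int) (k : Nat) :
    (l.set r x).getD k [] = if r = k ∧ r < l.length then x else l.getD k [] := by
  by_cases h : r = k
  · subst h
    by_cases hr : r < l.length
    · simp [List.getD_eq_getElem?_getD, hr]
    · simp [List.getD_eq_getElem?_getD, hr]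
  · simp [List.getD_eq_getElem?_getD, h]

theorem getD_set_inner (l : List Int) (c : Nat) (v : Int) (j : Nat) :
    (l.set c v).getD j 0 = if c = j ∧ c < l.length then v else l.getD j 0 := by
  by_cases h : c = j
  · subst h
    by_cases hc : c < l.length
    · simp [List.getD_eq_getElem?_getD, hc]
    · simp [List.getD_eq_getElem?_getD, hc]
  · simp [List.getD_eq_getElem?_getD, h]

theorem len_pvSetCell (F : List (List Int)) (r c : Nat) (v : Int) :
    (pvSetCell F r c v).length = F.length := by
  simp [pvSetCell]

theorem rowlen_pvSetCell (F : List (List Int)) (r c : Nat) (v : Int) (k : Nat) :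
    ((pvSetCell F r c v).getD k []).length = (F.getD k []).length := by
  unfold pvSetCell
  rw [getD_set_outer]
  split
  · rename_i h
    rw [← h.1]
    simp
  · rfl

theorem pvGet_pvSetCell (F : List (List Int)) (r c : Nat) (v : Int) (i j : Nat)
    (hr : r < F.length) (hc : c < (F.getD r []).length) :
    pvGet (pvSetCell F r c v) i j = if r = i ∧ c = j then v else pvGet F i j := by
  unfold pvGet pvSetCell
  rw [getD_set_outer]
  split
  · rename_i h
    rw [getD_set_inner]
    rcases h with ⟨hri, -⟩
    subst hri
    split
    · rename_i h2
      simp [h2.1]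
    · rename_i h2
      have hcj : ¬ c = j := fun hh => h2 ⟨hh, hc⟩
      simp [hcj]
  · rename_i h
    have hne : ¬ (r = i ∧ c = j) := fun hh => h ⟨hh.1, hr⟩
    simp [hne]

theorem len_pvSwap (F : List (List Int)) (r1 c1 r2 c2 : Nat) :
    (pvSwap F r1 c1 r2 c2).length = F.length := by
  simp [pvSwap, len_pvSetCell]

theorem rowlen_pvSwap (F : List (List Int)) (r1 c1 r2 c2 k : Nat) :
    ((pvSwap F r1 c1 r2 c2).getD k []).length = (F.getD k []).length := by
  show ((pvSetCell (pvSetCell F r1 c1 (pvGet F r2 c2)) r2 c2 (pvGet F r1 c1)).getD k []).length = _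
  rw [rowlen_pvSetCell, rowlen_pvSetCell]

theorem pvGet_pvSwap (F : List (List Int)) (r1 c1 r2 c2 : Nat) (i j : Nat)
    (hne : ¬ (r1 = r2 ∧ c1 = c2))
    (h1 : r1 < F.length) (h1c : c1 < (F.getD r1 []).length)
    (h2 : r2 < F.length) (h2c : c2 < (F.getD r2 []).length) :
    pvGet (pvSwap F r1 c1 r2 c2) i j =
      if r1 = i ∧ c1 = j then pvGet F r2 c2
      else if r2 = i ∧ c2 = j then pvGet F r1 c1
      else pvGet F i j := by
  unfold pvSwap
  rw [pvGet_pvSetCell _ _ _ _ _ _ (by rw [len_pvSetCell]; exact h2)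
        (by rw [rowlen_pvSetCell]; exact h2c)]
  rw [pvGet_pvSetCell _ _ _ _ _ _ h1 h1c]
  by_cases hA : r2 = i ∧ c2 = j
  · have hB : ¬ (r1 = i ∧ c1 = j) := by
      intro hh
      exact hne ⟨hh.1.trans hA.1.symm, hh.2.trans hA.2.symm⟩
    simp [hA, hB]
  · by_cases hB : r1 = i ∧ c1 = j <;> simp [hA, hB]

-- even / odd coordinate of a cell (meaningful when i+j is odd)
def pvEC (i j : Nat) : Nat := if i % 2 = 0 then i else j
def pvOC (i j : Nat) : Nat := if i % 2 = 0 then j else i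

-- ===== branch 2 (else branch) characterization =====

theorem inner2_char (A : List (List Int)) (hPre : Pre_calculate_matrix_F A)
    (k : Nat) (hk : k < A.length) (hk2 : k % 2 = 0)
    (F : List (List Int))
    (hlen : F.length = A.length)
    (hrow : ∀ t, (F.getD t []).length = (A.getD t []).length)
    (hget : ∀ i j, pvGet F i j =
      if i < A.length ∧ j < A.length ∧ (i + j) % 2 = 1 ∧ pvEC i j < k
      then pvGet A j i else pvGet A i j)
    (m : Nat) (hm : m ≤ A.length) :
    let G := (List.range m).foldl (fun F j => if j % 2 = 1 then pvSwap F k j j k else F) F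
    G.length = A.length ∧ (∀ t, (G.getD t []).length = (A.getD t []).length) ∧
    ∀ i j, pvGet G i j =
      if i < A.length ∧ j < A.length ∧ (i + j) % 2 = 1 ∧
         (pvEC i j < k ∨ (pvEC i j = k ∧ pvOC i j < m))
      then pvGet A j i else pvGet A i j := by
  induction m with
  | zero =>
    intro G
    refine ⟨hlen, hrow, ?_⟩
    intro i j
    show pvGet F i j = _
    rw [hget i j]
    congr 1
    simp only [eq_iff_iff]
    constructor
    · rintro ⟨a, b, c, d⟩; exact ⟨a, b, c, Or.inl d⟩
    · rintro ⟨a, b, c, d | d⟩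
      · exact ⟨a, b, c, d⟩
      · omega
  | succ m ih =>
    have hm' : m ≤ A.length := Nat.le_of_succ_le hm
    obtain ⟨glen, grow, gget⟩ := ih hm'
    intro G
    have hGdef : G = (fun F j => if j % 2 = 1 then pvSwap F k j j k else F)
        ((List.range m).foldl (fun F j => if j % 2 = 1 then pvSwap F k j j k else F) F) m := by
      show (List.range (m+1)).foldl _ F = _
      rw [List.range_succ, List.foldl_append, List.foldl_cons, List.foldl_nil]
    set Gm := (List.range m).foldl (fun F j => if j % 2 = 1 then pvSwap F k j j k else F) F with hGm
    by_cases hmo : m % 2 = 1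
    · -- real swap step: swap cells (k,m) and (m,k)
      have hGeq : G = pvSwap Gm k m m k := by rw [hGdef]; simp [hmo]
      have hmN : m < A.length := by omega
      have hkm : ¬ (k = m ∧ m = k) := by omega
      have hrk : k < Gm.length := by rw [glen]; exact hk
      have hck : m < (Gm.getD k []).length := by
        rw [grow k]
        have := hPre k hk
        unfold pvRowNeed at this
        rw [if_pos hk2] at this
        omega
      have hrm : m < Gm.length := by rw [glen]; exact hmN
      have hcm : k < (Gm.getD m []).length := by
        rw [grow m]
        have := hPre m hmN
        unfold pvRowNeed at this
        rw [if_neg (by omega)] at this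
        split at this <;> omega
      refine ⟨by rw [hGeq, len_pvSwap]; exact glen,
              fun t => by rw [hGeq, rowlen_pvSwap]; exact grow t, ?_⟩
      intro i j
      rw [hGeq, pvGet_pvSwap Gm k m m k i j hkm hrk hck hrm hcm]
      by_cases hc1 : k = i ∧ m = j
      · -- cell (k, m): becomes old F[m][k] = A[m][k]
        rw [if_pos hc1, ← hc1.1, ← hc1.2, gget m k]
        have h1 : ¬ (m < A.length ∧ k < A.length ∧ (m + k) % 2 = 1 ∧
            (pvEC m k < k ∨ (pvEC m k = k ∧ pvOC m k < m))) := by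
          unfold pvEC pvOC
          rw [if_neg (by omega), if_neg (by omega)]
          omega
        rw [if_neg h1]
        have h2 : k < A.length ∧ m < A.length ∧ (k + m) % 2 = 1 ∧
            (pvEC k m < k ∨ (pvEC k m = k ∧ pvOC k m < m + 1)) := by
          unfold pvEC pvOC
          rw [if_pos hk2, if_pos hk2]
          omega
        rw [if_pos h2]
      · rw [if_neg hc1]
        by_cases hc2 : m = i ∧ k = j
        · -- cell (m, k): becomes old F[k][m] = A[k][m]
          rw [if_pos hc2, ← hc2.1, ← hc2.2, gget k m]
          have h1 : ¬ (k < A.length ∧ m < A.length ∧ (k + m) % 2 = 1 ∧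
              (pvEC k m < k ∨ (pvEC k m = k ∧ pvOC k m < m))) := by
            unfold pvEC pvOC
            rw [if_pos hk2, if_pos hk2]
            omega
          rw [if_neg h1]
          have h2 : m < A.length ∧ k < A.length ∧ (m + k) % 2 = 1 ∧
              (pvEC m k < k ∨ (pvEC m k = k ∧ pvOC m k < m + 1)) := by
            unfold pvEC pvOC
            rw [if_neg (by omega), if_neg (by omega)]
            omega
          rw [if_pos h2]
        · -- untouched cell
          rw [if_neg hc2, gget i j]
          congr 1
          simp only [eq_iff_iff]
          constructor
          · rintro ⟨a, b, c, d | d⟩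
            · exact ⟨a, b, c, Or.inl d⟩
            · exact ⟨a, b, c, Or.inr ⟨d.1, by omega⟩⟩
          · rintro ⟨a, b, c, d | d⟩
            · exact ⟨a, b, c, Or.inl d⟩
            · refine ⟨a, b, c, Or.inr ⟨d.1, ?_⟩⟩
              -- pvOC i j = m would force (i,j) = (k,m) or (m,k), excluded
              obtain ⟨d1, d2⟩ := d
              rcases Nat.lt_succ_iff_lt_or_eq.mp d2 with h | h
              · exact h
              · exfalso
                unfold pvEC at d1
                unfold pvOC at h
                by_cases hie : i % 2 = 0
                · rw [if_pos hie] at d1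
                  rw [if_pos hie] at h
                  exact hc1 ⟨d1.symm, h.symm⟩
                · rw [if_neg hie] at d1
                  rw [if_neg hie] at h
                  exact hc2 ⟨h.symm, d1.symm⟩
    · -- j even: no-op step
      have hGeq : G = Gm := by rw [hGdef]; simp [hmo]
      refine ⟨by rw [hGeq]; exact glen, fun t => by rw [hGeq]; exact grow t, ?_⟩
      intro i j
      rw [hGeq, gget i j]
      congr 1
      simp only [eq_iff_iff]
      constructor
      · rintro ⟨a, b, c, d | d⟩
        · exact ⟨a, b, c, Or.inl d⟩
        · exact ⟨a, b, c, Or.inr ⟨d.1, by omega⟩⟩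
      · rintro ⟨a, b, c, d | d⟩
        · exact ⟨a, b, c, Or.inl d⟩
        · refine ⟨a, b, c, Or.inr ⟨d.1, ?_⟩⟩
          have hoc : pvOC i j % 2 = 1 := by
            unfold pvOC
            by_cases hie : i % 2 = 0 <;> [rw [if_pos hie]; rw [if_neg hie]] <;> omega
          omega

theorem outer2_char (A : List (List Int)) (hPre : Pre_calculate_matrix_F A)
    (k : Nat) (hk : k ≤ A.length) :
    let G := (List.range k).foldl (fun F i => if i % 2 = 0 then pvInner2 A.length i F else F) A
    G.length = A.length ∧ (∀ t, (G.getD t []).length = (A.getD t []).length) ∧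
    ∀ i j, pvGet G i j =
      if i < A.length ∧ j < A.length ∧ (i + j) % 2 = 1 ∧ pvEC i j < k
      then pvGet A j i else pvGet A i j := by
  induction k with
  | zero =>
    intro G
    refine ⟨rfl, fun t => rfl, ?_⟩
    intro i j
    have hn : ¬ (i < A.length ∧ j < A.length ∧ (i + j) % 2 = 1 ∧ pvEC i j < 0) := by
      rintro ⟨-, -, -, h⟩; omega
    rw [if_neg hn]
    rfl
  | succ k ih =>
    obtain ⟨glen, grow, gget⟩ := ih (by omega)
    intro G
    have hGdef : G = (fun F i => if i % 2 = 0 then pvInner2 A.length i F else F)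
        ((List.range k).foldl (fun F i => if i % 2 = 0 then pvInner2 A.length i F else F) A) k := by
      show (List.range (k+1)).foldl _ A = _
      rw [List.range_succ, List.foldl_append, List.foldl_cons, List.foldl_nil]
    set Gk := (List.range k).foldl (fun F i => if i % 2 = 0 then pvInner2 A.length i F else F) A with hGk
    by_cases hke : k % 2 = 0
    · have hGeq : G = pvInner2 A.length k Gk := by rw [hGdef]; simp [hke]
      obtain ⟨ilen, irow, iget⟩ := inner2_char A hPre k (by omega) hke Gk glen grow gget
        A.length (le_refl _)
      unfold pvInner2 at hGeq
      refine ⟨by rw [hGeq]; exact ilen, fun t => by rw [hGeq]; exact irow t, ?_⟩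
      intro i j
      rw [hGeq, iget i j]
      congr 1
      simp only [eq_iff_iff]
      constructor
      · rintro ⟨a, b, c, d | d⟩
        · exact ⟨a, b, c, by omega⟩
        · exact ⟨a, b, c, by omega⟩
      · rintro ⟨a, b, c, d⟩
        refine ⟨a, b, c, ?_⟩
        by_cases hd : pvEC i j < k
        · exact Or.inl hd
        · refine Or.inr ⟨by omega, ?_⟩
          unfold pvOC
          by_cases hie : i % 2 = 0 <;> [rw [if_pos hie]; rw [if_neg hie]] <;> omega
    · have hGeq : G = Gk := by rw [hGdef]; simp [hke]
      refine ⟨by rw [hGeq]; exact glen, fun t => by rw [hGeq]; exact grow t, ?_⟩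
      intro i j
      rw [hGeq, gget i j]
      congr 1
      simp only [eq_iff_iff]
      constructor
      · rintro ⟨a, b, c, d⟩; exact ⟨a, b, c, by omega⟩
      · rintro ⟨a, b, c, d⟩
        refine ⟨a, b, c, ?_⟩
        have hec : pvEC i j % 2 = 0 := by
          unfold pvEC
          by_cases hie : i % 2 = 0 <;> [rw [if_pos hie]; rw [if_neg hie]] <;> omega
        omega

-- ===== branch 1 (then branch) characterization =====

theorem inner1_char (A : List (List Int)) (hPre : Pre_calculate_matrix_F A)
    (k : Nat) (hk : k < A.length) (hk2 : k % 2 = 1)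
    (F : List (List Int))
    (hlen : F.length = A.length)
    (hrow : ∀ t, (F.getD t []).length = (A.getD t []).length)
    (hget : ∀ i j, pvGet F i j =
      if i < A.length ∧ j < A.length ∧ (i + j) % 2 = 1 ∧ pvOC i j < k
      then pvGet A j i else pvGet A i j)
    (m : Nat) (hm : m ≤ A.length) :
    let G := (List.range m).foldl (fun F j => if j % 2 = 0 then pvSwap F j k k j else F) F
    G.length = A.length ∧ (∀ t, (G.getD t []).length = (A.getD t []).length) ∧
    ∀ i j, pvGet G i j =
      if i < A.length ∧ j < A.length ∧ (i + j) % 2 = 1 ∧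
         (pvOC i j < k ∨ (pvOC i j = k ∧ pvEC i j < m))
      then pvGet A j i else pvGet A i j := by
  induction m with
  | zero =>
    intro G
    refine ⟨hlen, hrow, ?_⟩
    intro i j
    show pvGet F i j = _
    rw [hget i j]
    congr 1
    simp only [eq_iff_iff]
    constructor
    · rintro ⟨a, b, c, d⟩; exact ⟨a, b, c, Or.inl d⟩
    · rintro ⟨a, b, c, d | d⟩
      · exact ⟨a, b, c, d⟩
      · omega
  | succ m ih =>
    have hm' : m ≤ A.length := Nat.le_of_succ_le hm
    obtain ⟨glen, grow, gget⟩ := ih hm'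
    intro G
    have hGdef : G = (fun F j => if j % 2 = 0 then pvSwap F j k k j else F)
        ((List.range m).foldl (fun F j => if j % 2 = 0 then pvSwap F j k k j else F) F) m := by
      show (List.range (m+1)).foldl _ F = _
      rw [List.range_succ, List.foldl_append, List.foldl_cons, List.foldl_nil]
    set Gm := (List.range m).foldl (fun F j => if j % 2 = 0 then pvSwap F j k k j else F) F with hGm
    by_cases hmo : m % 2 = 0
    · -- real swap step: swap cells (m,k) and (k,m)
      have hGeq : G = pvSwap Gm m k k m := by rw [hGdef]; simp [hmo]
      have hmN : m < A.length := by omega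
      have hkm : ¬ (m = k ∧ k = m) := by omega
      have hrm : m < Gm.length := by rw [glen]; exact hmN
      have hcm : k < (Gm.getD m []).length := by
        rw [grow m]
        have := hPre m hmN
        unfold pvRowNeed at this
        rw [if_pos hmo] at this
        omega
      have hrk : k < Gm.length := by rw [glen]; exact hk
      have hck : m < (Gm.getD k []).length := by
        rw [grow k]
        have := hPre k hk
        unfold pvRowNeed at this
        rw [if_neg (by omega)] at this
        split at this <;> omega
      refine ⟨by rw [hGeq, len_pvSwap]; exact glen,
              fun t => by rw [hGeq, rowlen_pvSwap]; exact grow t, ?_⟩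
      intro i j
      rw [hGeq, pvGet_pvSwap Gm m k k m i j hkm hrm hcm hrk hck]
      by_cases hc1 : m = i ∧ k = j
      · -- cell (m, k): becomes old F[k][m] = A[k][m]
        rw [if_pos hc1, ← hc1.1, ← hc1.2, gget k m]
        have h1 : ¬ (k < A.length ∧ m < A.length ∧ (k + m) % 2 = 1 ∧
            (pvOC k m < k ∨ (pvOC k m = k ∧ pvEC k m < m))) := by
          unfold pvEC pvOC
          rw [if_neg (by omega), if_neg (by omega)]
          omega
        rw [if_neg h1]
        have h2 : m < A.length ∧ k < A.length ∧ (m + k) % 2 = 1 ∧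
            (pvOC m k < k ∨ (pvOC m k = k ∧ pvEC m k < m + 1)) := by
          unfold pvEC pvOC
          rw [if_pos hmo, if_pos hmo]
          omega
        rw [if_pos h2]
      · rw [if_neg hc1]
        by_cases hc2 : k = i ∧ m = j
        · -- cell (k, m): becomes old F[m][k] = A[m][k]
          rw [if_pos hc2, ← hc2.1, ← hc2.2, gget m k]
          have h1 : ¬ (m < A.length ∧ k < A.length ∧ (m + k) % 2 = 1 ∧
              (pvOC m k < k ∨ (pvOC m k = k ∧ pvEC m k < m))) := by
            unfold pvEC pvOC
            rw [if_pos hmo, if_pos hmo]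
            omega
          rw [if_neg h1]
          have h2 : k < A.length ∧ m < A.length ∧ (k + m) % 2 = 1 ∧
              (pvOC k m < k ∨ (pvOC k m = k ∧ pvEC k m < m + 1)) := by
            unfold pvEC pvOC
            rw [if_neg (by omega), if_neg (by omega)]
            omega
          rw [if_pos h2]
        · -- untouched cell
          rw [if_neg hc2, gget i j]
          congr 1
          simp only [eq_iff_iff]
          constructor
          · rintro ⟨a, b, c, d | d⟩
            · exact ⟨a, b, c, Or.inl d⟩
            · exact ⟨a, b, c, Or.inr ⟨d.1, by omega⟩⟩
          · rintro ⟨a, b, c, d | d⟩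
            · exact ⟨a, b, c, Or.inl d⟩
            · refine ⟨a, b, c, Or.inr ⟨d.1, ?_⟩⟩
              obtain ⟨d1, d2⟩ := d
              rcases Nat.lt_succ_iff_lt_or_eq.mp d2 with h | h
              · exact h
              · exfalso
                unfold pvOC at d1
                unfold pvEC at h
                by_cases hie : i % 2 = 0
                · rw [if_pos hie] at d1
                  rw [if_pos hie] at h
                  exact hc1 ⟨h.symm, d1.symm⟩
                · rw [if_neg hie] at d1
                  rw [if_neg hie] at h
                  exact hc2 ⟨d1.symm, h.symm⟩
    · -- j odd: no-op step
      have hGeq : G = Gm := by rw [hGdef]; simp [hmo]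
      refine ⟨by rw [hGeq]; exact glen, fun t => by rw [hGeq]; exact grow t, ?_⟩
      intro i j
      rw [hGeq, gget i j]
      congr 1
      simp only [eq_iff_iff]
      constructor
      · rintro ⟨a, b, c, d | d⟩
        · exact ⟨a, b, c, Or.inl d⟩
        · exact ⟨a, b, c, Or.inr ⟨d.1, by omega⟩⟩
      · rintro ⟨a, b, c, d | d⟩
        · exact ⟨a, b, c, Or.inl d⟩
        · refine ⟨a, b, c, Or.inr ⟨d.1, ?_⟩⟩
          have hec : pvEC i j % 2 = 0 := by
            unfold pvEC
            by_cases hie : i % 2 = 0 <;> [rw [if_pos hie]; rw [if_neg hie]] <;> omega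
          omega

theorem outer1_char (A : List (List Int)) (hPre : Pre_calculate_matrix_F A)
    (k : Nat) (hk : k ≤ A.length) :
    let G := (List.range k).foldl (fun F i => if i % 2 = 1 then pvInner1 A.length i F else F) A
    G.length = A.length ∧ (∀ t, (G.getD t []).length = (A.getD t []).length) ∧
    ∀ i j, pvGet G i j =
      if i < A.length ∧ j < A.length ∧ (i + j) % 2 = 1 ∧ pvOC i j < k
      then pvGet A j i else pvGet A i j := by
  induction k with
  | zero =>
    intro G
    refine ⟨rfl, fun t => rfl, ?_⟩
    intro i j
    have hn : ¬ (i < A.length ∧ j < A.length ∧ (i + j) % 2 = 1 ∧ pvOC i j < 0) := by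
      rintro ⟨-, -, -, h⟩; omega
    rw [if_neg hn]
    rfl
  | succ k ih =>
    obtain ⟨glen, grow, gget⟩ := ih (by omega)
    intro G
    have hGdef : G = (fun F i => if i % 2 = 1 then pvInner1 A.length i F else F)
        ((List.range k).foldl (fun F i => if i % 2 = 1 then pvInner1 A.length i F else F) A) k := by
      show (List.range (k+1)).foldl _ A = _
      rw [List.range_succ, List.foldl_append, List.foldl_cons, List.foldl_nil]
    set Gk := (List.range k).foldl (fun F i => if i % 2 = 1 then pvInner1 A.length i F else F) A with hGk
    by_cases hke : k % 2 = 1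
    · have hGeq : G = pvInner1 A.length k Gk := by rw [hGdef]; simp [hke]
      obtain ⟨ilen, irow, iget⟩ := inner1_char A hPre k (by omega) hke Gk glen grow gget
        A.length (le_refl _)
      unfold pvInner1 at hGeq
      refine ⟨by rw [hGeq]; exact ilen, fun t => by rw [hGeq]; exact irow t, ?_⟩
      intro i j
      rw [hGeq, iget i j]
      congr 1
      simp only [eq_iff_iff]
      constructor
      · rintro ⟨a, b, c, d | d⟩
        · exact ⟨a, b, c, by omega⟩
        · exact ⟨a, b, c, by omega⟩
      · rintro ⟨a, b, c, d⟩
        refine ⟨a, b, c, ?_⟩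
        by_cases hd : pvOC i j < k
        · exact Or.inl hd
        · refine Or.inr ⟨by omega, ?_⟩
          unfold pvEC
          by_cases hie : i % 2 = 0 <;> [rw [if_pos hie]; rw [if_neg hie]] <;> omega
    · have hGeq : G = Gk := by rw [hGdef]; simp [hke]
      refine ⟨by rw [hGeq]; exact glen, fun t => by rw [hGeq]; exact grow t, ?_⟩
      intro i j
      rw [hGeq, gget i j]
      congr 1
      simp only [eq_iff_iff]
      constructor
      · rintro ⟨a, b, c, d⟩; exact ⟨a, b, c, by omega⟩
      · rintro ⟨a, b, c, d⟩
        refine ⟨a, b, c, ?_⟩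
        have hoc : pvOC i j % 2 = 1 := by
          unfold pvOC
          by_cases hie : i % 2 = 0 <;> [rw [if_pos hie]; rw [if_neg hie]] <;> omega
        omega

-- ===== characterization of port B =====

theorem alt_len (A : List (List Int)) : (calculate_matrix_F_alt A).length = A.length := by
  simp [calculate_matrix_F_alt]

theorem getD_mapIdx_outer (A : List (List Int)) (g : Nat → List Int → List Int) (i : Nat) :
    (A.mapIdx g).getD i [] = if h : i < A.length then g i A[i] else [] := by
  by_cases h : i < A.length
  · rw [dif_pos h, List.getD_eq_getElem _ _ (by simpa using h), List.getElem_mapIdx]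
  · rw [dif_neg h, List.getD_eq_default _ _ (by simpa using Nat.le_of_not_lt h)]

theorem getD_mapIdx_inner (l : List Int) (f : Nat → Int → Int) (j : Nat) :
    (l.mapIdx f).getD j 0 = if h : j < l.length then f j l[j] else 0 := by
  by_cases h : j < l.length
  · rw [dif_pos h, List.getD_eq_getElem _ _ (by simpa using h), List.getElem_mapIdx]
  · rw [dif_neg h, List.getD_eq_default _ _ (by simpa using Nat.le_of_not_lt h)]

theorem alt_rowlen (A : List (List Int)) (t : Nat) :
    ((calculate_matrix_F_alt A).getD t []).length = (A.getD t []).length := by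
  show ((A.mapIdx (fun i row => row.mapIdx (fun j v =>
    if j < A.length ∧ (i + j) % 2 = 1 then pvGet A j i else v))).getD t []).length = _
  rw [getD_mapIdx_outer]
  by_cases ht : t < A.length
  · rw [dif_pos ht, List.getD_eq_getElem _ _ ht]
    simp
  · rw [dif_neg ht, List.getD_eq_default _ _ (Nat.le_of_not_lt ht)]

theorem alt_get (A : List (List Int)) (hPre : Pre_calculate_matrix_F A) (i j : Nat) :
    pvGet (calculate_matrix_F_alt A) i j =
      if i < A.length ∧ j < A.length ∧ (i + j) % 2 = 1
      then pvGet A j i else pvGet A i j := by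
  show ((A.mapIdx (fun i row => row.mapIdx (fun j v =>
    if j < A.length ∧ (i + j) % 2 = 1 then pvGet A j i else v))).getD i []).getD j 0 = _
  rw [getD_mapIdx_outer]
  by_cases hi : i < A.length
  · rw [dif_pos hi, getD_mapIdx_inner]
    have hArow : A.getD i [] = A[i] := List.getD_eq_getElem _ _ hi
    by_cases hj : j < A[i].length
    · rw [dif_pos hj]
      split
      · rename_i h
        rw [if_pos ⟨hi, h.1, h.2⟩]
      · rename_i h
        rw [if_neg (fun hh => h ⟨hh.2.1, hh.2.2⟩)]
        unfold pvGet
        rw [hArow, List.getD_eq_getElem _ _ hj]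
    · rw [dif_neg hj]
      -- j is out of row i's range: under Pre_ the transpose guard cannot hold
      split
      · rename_i h
        exfalso
        have hneed := hPre i hi
        unfold pvRowNeed at hneed
        rw [hArow] at hneed
        by_cases hie : i % 2 = 0
        · rw [if_pos hie] at hneed; omega
        · rw [if_neg hie] at hneed
          split at hneed <;> omega
      · unfold pvGet
        rw [hArow, List.getD_eq_default _ _ (Nat.le_of_not_lt hj)]
  · rw [dif_neg hi, if_neg (fun hh => hi hh.1)]
    unfold pvGet
    rw [List.getD_eq_default _ _ (Nat.le_of_not_lt hi)]

-- matrices agreeing in shape and in every pvGet cell are equal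
theorem eq_of_pvGet (F G : List (List Int))
    (h1 : F.length = G.length)
    (h2 : ∀ t, (F.getD t []).length = (G.getD t []).length)
    (h3 : ∀ t j, pvGet F t j = pvGet G t j) : F = G := by
  apply List.ext_getElem h1
  intro t ht1 ht2
  have hrl : F[t].length = G[t].length := by
    have := h2 t
    rwa [List.getD_eq_getElem _ _ ht1, List.getD_eq_getElem _ _ ht2] at this
  apply List.ext_getElem hrl
  intro j hj1 hj2
  have := h3 t j
  unfold pvGet at this
  rwa [List.getD_eq_getElem _ _ ht1, List.getD_eq_getElem _ _ ht2,
       List.getD_eq_getElem _ _ hj1, List.getD_eq_getElem _ _ hj2] at this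

theorem branch1_eq_alt (A : List (List Int)) (hPre : Pre_calculate_matrix_F A) :
    pvOuter1 A.length A = calculate_matrix_F_alt A := by
  obtain ⟨glen, grow, gget⟩ := outer1_char A hPre A.length (le_refl _)
  apply eq_of_pvGet
  · rw [alt_len]; exact glen
  · intro t; rw [alt_rowlen]; exact grow t
  · intro i j
    show pvGet ((List.range A.length).foldl _ A) i j = _
    rw [gget i j, alt_get A hPre i j]
    congr 1
    simp only [eq_iff_iff]
    constructor
    · rintro ⟨a, b, c, -⟩; exact ⟨a, b, c⟩
    · rintro ⟨a, b, c⟩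
      refine ⟨a, b, c, ?_⟩
      unfold pvOC
      by_cases hie : i % 2 = 0 <;> [rw [if_pos hie]; rw [if_neg hie]] <;> omega

theorem branch2_eq_alt (A : List (List Int)) (hPre : Pre_calculate_matrix_F A) :
    pvOuter2 A.length A = calculate_matrix_F_alt A := by
  obtain ⟨glen, grow, gget⟩ := outer2_char A hPre A.length (le_refl _)
  apply eq_of_pvGet
  · rw [alt_len]; exact glen
  · intro t; rw [alt_rowlen]; exact grow t
  · intro i j
    show pvGet ((List.range A.length).foldl _ A) i j = _
    rw [gget i j, alt_get A hPre i j]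
    congr 1
    simp only [eq_iff_iff]
    constructor
    · rintro ⟨a, b, c, -⟩; exact ⟨a, b, c⟩
    · rintro ⟨a, b, c⟩
      refine ⟨a, b, c, ?_⟩
      unfold pvEC
      by_cases hie : i % 2 = 0 <;> [rw [if_pos hie]; rw [if_neg hie]] <;> omega

-- ===== VERDICT (by name: the statement is the Claim_ definition above) =====
theorem calculate_matrix_F_spec : Claim_equal_calculate_matrix_F := by
  intro A _hDom hPre
  unfold Spec_calculate_matrix_F calculate_matrix_F
  have key : ∀ c : Bool, (if c = true then pvOuter1 A.length A else pvOuter2 A.length A) =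
      calculate_matrix_F_alt A := by
    intro c
    cases c
    · rw [if_neg (by simp)]
      exact branch2_eq_alt A hPre
    · rw [if_pos rfl]
      exact branch1_eq_alt A hPre
  exact key _
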